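-- pv_equiv track=rewrite | github.com/likepotatoman/AOC-2024 | Day 9/S1.py | filled
-- ===== SOURCE A (Python) =====
-- def filled(data):
--     hole = False
--     for i in range(len(data)):
--         if data[i] == ".":
--             hole = True
--         if hole == True:
--             if data[i] != ".":
--                 return False
--     return True
-- ===== SOURCE B (Python) =====
-- def filled(data):
--     total = sum(1 for x in data if x == ".")
--     trailing = 0
--     for x in reversed(data):
--         if x == ".":
--             trailing += 1
--         else:
--             break
--     return total == trailing
-- ===== Notes on version B (the rewrite author's own statement) =====
-- stated objective: simpler
-- what changed: A simulates a stateful forward scan with a 'hole' flag and early return; B counts all dots and the trailing run of dots from the right and returns whether they are equal.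
import Mathlib
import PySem

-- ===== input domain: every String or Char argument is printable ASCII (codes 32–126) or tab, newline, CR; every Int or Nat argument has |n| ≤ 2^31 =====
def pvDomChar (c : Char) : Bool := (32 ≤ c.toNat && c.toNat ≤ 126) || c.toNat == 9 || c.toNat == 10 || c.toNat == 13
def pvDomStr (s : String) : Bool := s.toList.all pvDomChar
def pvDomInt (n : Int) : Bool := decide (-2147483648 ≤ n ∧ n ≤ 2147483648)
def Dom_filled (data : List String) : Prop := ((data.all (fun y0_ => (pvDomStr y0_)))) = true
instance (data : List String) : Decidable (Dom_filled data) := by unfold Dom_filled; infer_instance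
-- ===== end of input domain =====

-- B replaces A's stateful forward scan ('hole' flag + early return) by counting all
-- dots and the trailing run of dots from the right, returning whether they are equal.

-- ===== PORT A =====
-- loop body of A: 'hole' is the flag; returns false early when a non-dot follows a dot
def filledGo (hole : Bool) : List String → Bool
  | [] => true
  | x :: xs =>
    let hole' := if x == "." then true else hole
    if hole' = true then
      if x != "." then false else filledGo hole' xs
    else filledGo hole' xs

def filled (data : List String) : Bool := filledGo false data

-- ===== PORT B =====
-- total = sum(1 for x in data if x == ".")
def fbTotal (data : List String) : Int :=
  data.foldl (fun a x => if x == "." then a + 1 else a) 0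

-- the 'for x in reversed(data): … break' loop, as leading-run count on the reversed list
def fbLead : List String → Int
  | [] => 0
  | x :: xs => if x == "." then fbLead xs + 1 else 0

def filled_alt (data : List String) : Bool :=
  fbTotal data == fbLead data.reverse

-- ===== PRECONDITION & SPEC =====
def Spec_filled (data : List String) (out : Bool) : Prop := out = filled_alt data
instance (data : List String) (out : Bool) : Decidable (Spec_filled data out) := by unfold Spec_filled; infer_instance

-- ===== CLAIM (what is proved, stated in full; the proofs are below) =====
def Claim_equal_filled : Prop := ∀ (data : List String), Dom_filled data → Spec_filled data (filled data)

-- ===== LEMMAS AND PROOFS =====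

theorem fbTotal_go (xs : List String) (a : Int) :
    xs.foldl (fun a x => if x == "." then a + 1 else a) a
      = a + (xs.countP (fun x => x == ".") : Int) := by
  induction xs generalizing a with
  | nil => simp
  | cons x xs ih =>
      simp only [List.foldl_cons, List.countP_cons, ih]
      by_cases h : x = "." <;> simp [h] <;> try ring

theorem fbTotal_eq (xs : List String) :
    fbTotal xs = (xs.countP (fun x => x == ".") : Int) := by
  unfold fbTotal; rw [fbTotal_go]; ring

-- Nat-valued leading-dot run
def leadN : List String → Nat
  | [] => 0
  | x :: xs => if x == "." then leadN xs + 1 else 0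

theorem fbLead_eq (xs : List String) : fbLead xs = (leadN xs : Nat) := by
  induction xs with
  | nil => rfl
  | cons x xs ih =>
      by_cases h : x = "." <;> simp [fbLead, leadN, h, ih]

theorem leadN_le_countP (xs : List String) :
    leadN xs ≤ xs.countP (fun x => x == ".") := by
  induction xs with
  | nil => simp [leadN]
  | cons x xs ih =>
      by_cases h : x = "." <;> simp [leadN, h] <;> omega

theorem leadN_append (ys : List String) (y : String) :
    leadN (ys ++ [y])
      = if leadN ys = ys.length then leadN ys + (if y == "." then 1 else 0)
        else leadN ys := by
  induction ys with
  | nil => by_cases h : y = "." <;> simp [leadN, h]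
  | cons x xs ih =>
      by_cases h : x = "." <;> simp [leadN, h, ih] <;> (try split_ifs) <;> omega

theorem leadN_eq_length_iff (xs : List String) :
    leadN xs = xs.length ↔ xs.all (fun x => x == ".") := by
  induction xs with
  | nil => simp [leadN]
  | cons x xs ih =>
      by_cases h : x = "."
      · simp [leadN, h, ih]
      · simp only [leadN, if_neg (by simp [h] : ¬((x == ".") = true)),
          List.length_cons, List.all_cons]
        simp [h]

theorem trail_eq_length_iff (xs : List String) :
    leadN xs.reverse = xs.length ↔ xs.all (fun x => x == ".") := by
  rw [← List.length_reverse, leadN_eq_length_iff]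
  simp

-- filledGo true = all dots
theorem filledGo_true (xs : List String) :
    filledGo true xs = xs.all (fun x => x == ".") := by
  induction xs with
  | nil => rfl
  | cons x xs ih =>
      by_cases h : x = "." <;> simp [filledGo, h, ih]

-- trailing run on cons
theorem trail_cons (x : String) (xs : List String) :
    leadN (x :: xs).reverse
      = if leadN xs.reverse = xs.length then
          leadN xs.reverse + (if x == "." then 1 else 0)
        else leadN xs.reverse := by
  have := leadN_append xs.reverse x
  simpa using this

theorem countP_reverse' (xs : List String) :
    xs.reverse.countP (fun x => x == ".") = xs.countP (fun x => x == ".") :=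
  List.countP_reverse ..

theorem trail_le_countP (xs : List String) :
    leadN xs.reverse ≤ xs.countP (fun x => x == ".") := by
  have := leadN_le_countP xs.reverse
  simpa [countP_reverse'] using this

theorem main_eq (xs : List String) :
    filledGo false xs
      = decide (xs.countP (fun x => x == ".") = leadN xs.reverse) := by
  induction xs with
  | nil => simp [filledGo, leadN]
  | cons x xs ih =>
      by_cases h : x = "."
      · -- A side: filledGo false ("."::xs) = filledGo true xs = all dots
        have hA : filledGo false (x :: xs) = xs.all (fun x => x == ".") := by
          simp [filledGo, h, filledGo_true]
        rw [hA, trail_cons]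
        by_cases hall : xs.all (fun x => x == ".") = true
        · have hlen : leadN xs.reverse = xs.length := (trail_eq_length_iff xs).mpr hall
          have hcnt : xs.countP (fun x => x == ".") = xs.length := by
            simp [List.all_eq_true] at hall
            rw [List.countP_eq_length]
            intro a ha; simpa using hall a ha
          simp [h, hall, hlen, hcnt]
        · have hlen : leadN xs.reverse ≠ xs.length := fun hc =>
            hall ((trail_eq_length_iff xs).mp hc)
          have hle := trail_le_countP xs
          simp only [Bool.not_eq_true] at hall
          rw [hall]
          simp [h, hlen]
          omega
      · -- A side: filledGo false (x::xs) = filledGo false xs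
        have hA : filledGo false (x :: xs) = filledGo false xs := by
          simp [filledGo, h]
        rw [hA, ih, trail_cons]
        simp [h]

-- ===== VERDICT (by name: the statement is the Claim_ definition above) =====
theorem filled_spec : Claim_equal_filled := by
  intro data _
  unfold Spec_filled filled filled_alt
  rw [main_eq, fbTotal_eq, fbLead_eq]
  by_cases hc : data.countP (fun x => x == ".") = leadN data.reverse
  · simp [hc]
  · have hci : ((data.countP (fun x => x == ".") : Int)) ≠ (leadN data.reverse : Int) := by
      exact_mod_cast hc
    simp [hc, hci]
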